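-- pv_equiv track=rewrite | github.com/tpov/Infera | integrated_agi_controller.py | _convert_to_system_commands
-- ===== SOURCE A (Python) =====
-- from typing import Dict, List, Any, Optional, Tuple, Set
--
-- def _convert_to_system_commands(contextual_commands: List[str],
--                               context_analysis: Dict[str, Any]) -> str:
--     """Преобразует контекстные команды в команды системы"""
--
--     system_commands = []
--
--     for command in contextual_commands:
--         if "analyze_context" in command:
--             system_commands.append("create system quantity 1 type analyzer")
--         elif "create_hypothesis" in command:
--             system_commands.append("create hypothesis quantity 1 confidence 0.7")
--         elif "find_patterns" in command:
--             system_commands.append("create pattern_detector quantity 1 sensitivity high")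
--         elif "extract_meaning" in command:
--             system_commands.append("create meaning_extractor quantity 1 depth deep")
--         elif "build_logical_chain" in command:
--             system_commands.append("create logic_chain quantity 1 complexity high")
--         elif "update_knowledge" in command:
--             system_commands.append("create knowledge_base quantity 1 update_mode active")
--         elif "create_association" in command:
--             system_commands.append("create association_network quantity 1 connections multiple")
--         elif "analyze_emotion" in command:
--             system_commands.append("create emotion_analyzer quantity 1 sensitivity high")
--         elif "execute_command" in command:
--             system_commands.append("create executor quantity 1 mode active")
--         elif "record_observation" in command:
--             system_commands.append("create observer quantity 1 observation_type detailed")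
--         else:
--             # Общая команда для неизвестных команд
--             system_commands.append("create system quantity 1 type general")
--
--     return f"[{', '.join(system_commands)}]"
-- ===== SOURCE B (Python) =====
-- _TABLE = [
--     ("analyze_context", "create system quantity 1 type analyzer"),
--     ("create_hypothesis", "create hypothesis quantity 1 confidence 0.7"),
--     ("find_patterns", "create pattern_detector quantity 1 sensitivity high"),
--     ("extract_meaning", "create meaning_extractor quantity 1 depth deep"),
--     ("build_logical_chain", "create logic_chain quantity 1 complexity high"),
--     ("update_knowledge", "create knowledge_base quantity 1 update_mode active"),
--     ("create_association", "create association_network quantity 1 connections multiple"),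
--     ("analyze_emotion", "create emotion_analyzer quantity 1 sensitivity high"),
--     ("execute_command", "create executor quantity 1 mode active"),
--     ("record_observation", "create observer quantity 1 observation_type detailed"),
-- ]
--
-- _DEFAULT = "create system quantity 1 type general"
--
--
-- def _convert_to_system_commands(contextual_commands, context_analysis):
--     """Преобразует контекстные команды в команды системы"""
--     # Inverted loop nesting: one pass per keyword over the whole command list,
--     # from lowest to highest priority, overwriting matches in place, so the
--     # highest-priority (earliest) matching keyword's command survives.
--     out = [_DEFAULT] * len(contextual_commands)
--     for key, sys_cmd in reversed(_TABLE):
--         for i, command in enumerate(contextual_commands):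
--             if key in command:
--                 out[i] = sys_cmd
--     return "[" + ", ".join(out) + "]"
-- ===== Notes on version B (the rewrite author's own statement) =====
-- stated objective: alternative
-- what changed: Inverts the loop nesting: instead of testing the ten keywords per command with an if/elif chain, B starts from an all-default output array and makes one overwrite pass over the whole command list per keyword, from lowest to highest priority, so the earliest matching keyword's command survives.
import Mathlib
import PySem

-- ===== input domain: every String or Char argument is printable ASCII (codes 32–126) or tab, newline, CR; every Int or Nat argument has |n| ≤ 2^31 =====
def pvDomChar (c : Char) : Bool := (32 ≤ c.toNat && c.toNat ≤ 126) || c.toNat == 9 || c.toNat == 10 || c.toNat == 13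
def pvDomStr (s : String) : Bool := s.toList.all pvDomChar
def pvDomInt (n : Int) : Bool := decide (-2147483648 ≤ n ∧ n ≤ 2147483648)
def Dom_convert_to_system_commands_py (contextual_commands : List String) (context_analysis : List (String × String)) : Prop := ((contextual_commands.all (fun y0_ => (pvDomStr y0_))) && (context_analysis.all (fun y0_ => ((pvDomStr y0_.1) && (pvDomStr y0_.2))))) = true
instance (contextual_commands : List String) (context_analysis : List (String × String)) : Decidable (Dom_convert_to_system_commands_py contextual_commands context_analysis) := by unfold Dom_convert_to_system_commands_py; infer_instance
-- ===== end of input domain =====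

-- B inverts A's loop nesting: one overwrite pass over the command list per keyword (lowest to highest priority) instead of A's per-command if/elif chain; objective: alternative.


-- ===== PORT A =====
-- one iteration of A's loop body: the if/elif chain choosing the appended command
def pvAStep (command : String) : String :=
  if PySem.Str.isIn "analyze_context" command then "create system quantity 1 type analyzer"
  else if PySem.Str.isIn "create_hypothesis" command then "create hypothesis quantity 1 confidence 0.7"
  else if PySem.Str.isIn "find_patterns" command then "create pattern_detector quantity 1 sensitivity high"
  else if PySem.Str.isIn "extract_meaning" command then "create meaning_extractor quantity 1 depth deep"
  else if PySem.Str.isIn "build_logical_chain" command then "create logic_chain quantity 1 complexity high"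
  else if PySem.Str.isIn "update_knowledge" command then "create knowledge_base quantity 1 update_mode active"
  else if PySem.Str.isIn "create_association" command then "create association_network quantity 1 connections multiple"
  else if PySem.Str.isIn "analyze_emotion" command then "create emotion_analyzer quantity 1 sensitivity high"
  else if PySem.Str.isIn "execute_command" command then "create executor quantity 1 mode active"
  else if PySem.Str.isIn "record_observation" command then "create observer quantity 1 observation_type detailed"
  else "create system quantity 1 type general"

def convert_to_system_commands_py (contextual_commands : List String) (context_analysis : List (String × String)) : String :=
  let system_commands := contextual_commands.foldl (fun acc command => acc ++ [pvAStep command]) []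
  PySem.Str.join "" ["[", PySem.Str.join ", " system_commands, "]"]

-- ===== PORT B =====
def pvTable : List (String × String) :=
  [("analyze_context", "create system quantity 1 type analyzer"),
   ("create_hypothesis", "create hypothesis quantity 1 confidence 0.7"),
   ("find_patterns", "create pattern_detector quantity 1 sensitivity high"),
   ("extract_meaning", "create meaning_extractor quantity 1 depth deep"),
   ("build_logical_chain", "create logic_chain quantity 1 complexity high"),
   ("update_knowledge", "create knowledge_base quantity 1 update_mode active"),
   ("create_association", "create association_network quantity 1 connections multiple"),
   ("analyze_emotion", "create emotion_analyzer quantity 1 sensitivity high"),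
   ("execute_command", "create executor quantity 1 mode active"),
   ("record_observation", "create observer quantity 1 observation_type detailed")]

def pvDefault : String := "create system quantity 1 type general"

-- B: start from an all-default output and, per keyword (reversed table), overwrite the slots
-- whose command contains the keyword; the inner indexed overwrite pass is a zipWith.
def convert_to_system_commands_py_alt (contextual_commands : List String) (context_analysis : List (String × String)) : String :=
  let out := pvTable.reverse.foldl
    (fun out kv =>
      List.zipWith (fun command cur => if PySem.Str.isIn kv.1 command then kv.2 else cur)
        contextual_commands out)
    (contextual_commands.map (fun _ => pvDefault))
  PySem.Str.join "" ["[", PySem.Str.join ", " out, "]"]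

-- ===== PRECONDITION & SPEC =====
def Spec_convert_to_system_commands_py (contextual_commands : List String) (context_analysis : List (String × String)) (out : String) : Prop := out = convert_to_system_commands_py_alt contextual_commands context_analysis
instance (contextual_commands : List String) (context_analysis : List (String × String)) (out : String) : Decidable (Spec_convert_to_system_commands_py contextual_commands context_analysis out) := by unfold Spec_convert_to_system_commands_py; infer_instance

-- ===== CLAIM (what is proved, stated in full; the proofs are below) =====
def Claim_equal_convert_to_system_commands_py : Prop := ∀ (contextual_commands : List String) (context_analysis : List (String × String)), Dom_convert_to_system_commands_py contextual_commands context_analysis → Spec_convert_to_system_commands_py contextual_commands context_analysis (convert_to_system_commands_py contextual_commands context_analysis)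

-- ===== LEMMAS AND PROOFS =====
theorem pvZipWith_map (f : String → String → String) (g : String → String) (l : List String) :
    List.zipWith f l (l.map g) = l.map (fun c => f c (g c)) := by
  induction l with
  | nil => rfl
  | cons x t ih => simp [ih]

theorem pvFold_zip_eq_map (T : List (String × String)) (cmds : List String)
    (g : String → String) :
    T.foldl (fun out kv =>
        List.zipWith (fun command cur => if PySem.Str.isIn kv.1 command then kv.2 else cur)
          cmds out) (cmds.map g)
      = cmds.map (fun c => T.foldl (fun cur kv => if PySem.Str.isIn kv.1 c then kv.2 else cur) (g c)) := by
  induction T generalizing g with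
  | nil => rfl
  | cons kv t ih =>
    simp only [List.foldl_cons, pvZipWith_map]
    exact ih (fun c => if PySem.Str.isIn kv.1 c then kv.2 else g c)

theorem pvElem_eq (c : String) :
    pvTable.reverse.foldl (fun cur kv => if PySem.Str.isIn kv.1 c then kv.2 else cur) pvDefault
      = pvAStep c := by
  simp only [pvTable, pvDefault, pvAStep, List.reverse, List.reverseAux, List.foldl]

theorem pvFoldl_eq_map (f : String → String) (xs : List String) (acc : List String) :
    xs.foldl (fun acc command => acc ++ [f command]) acc = acc ++ xs.map f := by
  induction xs generalizing acc with
  | nil => simp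
  | cons x t ih => simp [List.foldl, ih]

-- ===== VERDICT (by name: the statement is the Claim_ definition above) =====
theorem convert_to_system_commands_py_spec : Claim_equal_convert_to_system_commands_py := by
  intro cmds ctx _
  unfold Spec_convert_to_system_commands_py convert_to_system_commands_py convert_to_system_commands_py_alt
  simp only [pvFoldl_eq_map, List.nil_append, pvFold_zip_eq_map, pvElem_eq]
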